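-- pv_equiv track=rewrite | github.com/AfexGenesis/AfexCore | assets/gene-comparator.py | format_alignment_display
-- ===== SOURCE A (Python) =====
-- def format_alignment_display(aligned_seq1, aligned_seq2, line_length=60):
--     """Format alignment for display with match indicators"""
--     lines = []
--
--     for i in range(0, len(aligned_seq1), line_length):
--         query_line = aligned_seq1[i:i+line_length]
--         subject_line = aligned_seq2[i:i+line_length]
--
--         # Create match line
--         match_line = ''
--         for q, s in zip(query_line, subject_line):
--             if q == s and q != '-':
--                 match_line += '|'
--             elif q != '-' and s != '-':
--                 match_line += ':'
--             else:
--                 match_line += ' '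
--
--         lines.append(f"Query  {i+1:>6} {query_line} {i+len(query_line)}")
--         lines.append(f"              {match_line}")
--         lines.append(f"Sbjct  {i+1:>6} {subject_line} {i+len(subject_line)}")
--         lines.append("")
--
--     return '\n'.join(lines)
-- ===== SOURCE B (Python) =====
-- def format_alignment_display(aligned_seq1, aligned_seq2, line_length=60):
--     """Format alignment for display: consume the two sequences chunk by chunk,
--     appending each whole block to one output string, then strip the final newline."""
--     if line_length <= 0:
--         return ''
--
--     def match_char(a, b):
--         if a == b != '-':
--             return '|'
--         if a == '-' or b == '-':
--             return ' '
--         return ':'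
--
--     out = ''
--     q, s, pos = aligned_seq1, aligned_seq2, 0
--     while q:
--         hq, hs = q[:line_length], s[:line_length]
--         m = ''.join(map(match_char, hq, hs))
--         out += (f"Query  {pos+1:>6} {hq} {pos+len(hq)}\n"
--                 f"              {m}\n"
--                 f"Sbjct  {pos+1:>6} {hs} {pos+len(hs)}\n\n")
--         q, s, pos = q[line_length:], s[line_length:], pos + line_length
--     return out[:-1]
-- ===== Notes on version B (the rewrite author's own statement) =====
-- stated objective: alternative
-- what changed: B replaces A's index loop (range over chunk starts, slicing the full strings, a flat 4-entries-per-block list joined at the end) by a loop that consumes the two sequences chunk by chunk (slicing off the head suffixes), appends each whole block to a single output string and strips the final newline instead of joining.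
-- outside the precondition, e.g. on format_alignment_display('AC', 'AC', 0): A raises ValueError, B returns ''
import Mathlib
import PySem

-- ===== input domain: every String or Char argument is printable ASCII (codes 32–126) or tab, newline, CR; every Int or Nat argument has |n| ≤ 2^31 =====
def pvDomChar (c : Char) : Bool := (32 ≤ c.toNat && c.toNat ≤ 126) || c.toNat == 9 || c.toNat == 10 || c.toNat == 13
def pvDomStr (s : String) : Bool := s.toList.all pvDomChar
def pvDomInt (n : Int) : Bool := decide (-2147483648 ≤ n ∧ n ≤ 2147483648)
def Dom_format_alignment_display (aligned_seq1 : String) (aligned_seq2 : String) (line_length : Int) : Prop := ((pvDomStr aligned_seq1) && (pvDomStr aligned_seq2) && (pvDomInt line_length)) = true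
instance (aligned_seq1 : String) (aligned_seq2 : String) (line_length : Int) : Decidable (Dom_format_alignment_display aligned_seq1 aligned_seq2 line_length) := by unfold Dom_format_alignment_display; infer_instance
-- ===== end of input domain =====

-- B replaces A's index loop (range + slicing the full strings + a flat 4-entry-per-block
-- list joined at the end) by a loop that consumes the two sequences chunk by chunk,
-- appending each whole block to one output string and stripping the final newline
-- (objective: alternative decomposition, same cost).

-- f"{n:>6}": str(n) right-justified to width 6 with spaces (exact: Python pads only when shorter).
def pvPad6 (n : Int) : List Char :=
  let s := PySem.Int.toChars n
  List.replicate (6 - s.length) ' ' ++ s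

-- ===== PORT A =====
def format_alignment_display (aligned_seq1 : String) (aligned_seq2 : String) (line_length : Int) : String :=
  let s1 := aligned_seq1.toList
  let s2 := aligned_seq2.toList
  let lines := (PySem.List.pyRange 0 (s1.length : Int) line_length).foldl (fun lines i =>
    let query_line := PySem.List.slice s1 (some i) (some (i + line_length))
    let subject_line := PySem.List.slice s2 (some i) (some (i + line_length))
    let match_line := (query_line.zip subject_line).foldl (fun m p =>
      if p.1 = p.2 ∧ p.1 ≠ '-' then m ++ ['|']
      else if p.1 ≠ '-' ∧ p.2 ≠ '-' then m ++ [':']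
      else m ++ [' ']) []
    lines ++ ["Query  ".toList ++ pvPad6 (i+1) ++ [' '] ++ query_line ++ [' '] ++ PySem.Int.toChars (i + (query_line.length : Int)),
              "              ".toList ++ match_line,
              "Sbjct  ".toList ++ pvPad6 (i+1) ++ [' '] ++ subject_line ++ [' '] ++ PySem.Int.toChars (i + (subject_line.length : Int)),
              ([] : List Char)]) []
  String.mk (PySem.Chars.join ['\n'] lines)

-- ===== PORT B =====
def pvMatchChar (a b : Char) : Char :=
  if a = b ∧ b ≠ '-' then '|'
  else if a = '-' ∨ b = '-' then ' '
  else ':'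

-- Source B's while loop as structural recursion on the consumed query suffix
-- (the 'L = 0 → out' branch is a totality guard only: the caller returns before the loop when line_length ≤ 0).
def pvGo (L : Nat) (q s : List Char) (pos : Int) (out : List Char) : List Char :=
  if L = 0 then out
  else if hq : q = [] then out
  else
    let hqc := q.take L
    let hsc := s.take L
    let m := (hqc.zip hsc).map (fun p => pvMatchChar p.1 p.2)
    pvGo L (q.drop L) (s.drop L) (pos + L)
      (out ++ "Query  ".toList ++ pvPad6 (pos+1) ++ [' '] ++ hqc ++ [' '] ++ PySem.Int.toChars (pos + (hqc.length : Int)) ++ ['\n'] ++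
       "              ".toList ++ m ++ ['\n'] ++
       "Sbjct  ".toList ++ pvPad6 (pos+1) ++ [' '] ++ hsc ++ [' '] ++ PySem.Int.toChars (pos + (hsc.length : Int)) ++ ['\n', '\n'])
termination_by q.length
decreasing_by
  have h := List.length_pos_iff.mpr hq
  simp only [List.length_drop]
  omega

def format_alignment_display_alt (aligned_seq1 : String) (aligned_seq2 : String) (line_length : Int) : String :=
  if line_length ≤ 0 then "" else
  String.mk (PySem.List.slice (pvGo line_length.toNat aligned_seq1.toList aligned_seq2.toList 0 []) none (some (-1)))

-- ===== PRECONDITION & SPEC =====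
-- Pre_ excludes only line_length = 0, where Python's range(0, n, 0) makes A raise ValueError.
def Pre_format_alignment_display (aligned_seq1 : String) (aligned_seq2 : String) (line_length : Int) : Prop := line_length ≠ 0
instance (aligned_seq1 : String) (aligned_seq2 : String) (line_length : Int) : Decidable (Pre_format_alignment_display aligned_seq1 aligned_seq2 line_length) := by unfold Pre_format_alignment_display; infer_instance
def pvWitness_format_alignment_display : String × String × Int := ("ACG-T", "AC-TT", 3)

def Spec_format_alignment_display (aligned_seq1 : String) (aligned_seq2 : String) (line_length : Int) (out : String) : Prop := out = format_alignment_display_alt aligned_seq1 aligned_seq2 line_length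
instance (aligned_seq1 : String) (aligned_seq2 : String) (line_length : Int) (out : String) : Decidable (Spec_format_alignment_display aligned_seq1 aligned_seq2 line_length out) := by unfold Spec_format_alignment_display; infer_instance

-- ===== CLAIM (what is proved, stated in full; the proofs are below) =====
def Claim_equal_format_alignment_display : Prop := ∀ (aligned_seq1 : String) (aligned_seq2 : String) (line_length : Int), Dom_format_alignment_display aligned_seq1 aligned_seq2 line_length → Pre_format_alignment_display aligned_seq1 aligned_seq2 line_length → Spec_format_alignment_display aligned_seq1 aligned_seq2 line_length (format_alignment_display aligned_seq1 aligned_seq2 line_length)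

-- ===== LEMMAS AND PROOFS =====

-- A negative-step range starting at 0 with a nonnegative stop is empty.
lemma pyRange_neg_empty (n s : Int) (hn : 0 ≤ n) (hs : s < 0) : PySem.List.pyRange 0 n s = [] := by
  simp only [PySem.List.pyRange]
  rw [if_neg (by omega)]
  rw [if_neg (by omega), if_neg (by omega)]
  rfl

-- a positive-step range with nonpositive stop is empty.
lemma pyRange_pos_nil (n L : Int) (hL : 0 < L) (hn : n ≤ 0) : PySem.List.pyRange 0 n L = [] := by
  rw [PySem.List.pyRange_of_pos _ _ hL, if_neg (by omega)]
  rfl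

-- peel the first index off a positive-step range and re-base the rest at 0.
lemma pyRange_pos_cons (n L : Int) (hL : 0 < L) (hn : 0 < n) :
    PySem.List.pyRange 0 n L = 0 :: (PySem.List.pyRange 0 (n - L) L).map (· + L) := by
  rw [PySem.List.pyRange_of_pos _ _ hL, PySem.List.pyRange_of_pos _ _ hL]
  have h1 : (n - 0 + L - 1) / L = (n - 1) / L + 1 := by
    have he : n - 0 + L - 1 = (n - 1) + 1 * L := by ring
    rw [he, Int.add_mul_ediv_right _ _ (by omega)]
  have hnn : 0 ≤ (n - 1) / L := Int.ediv_nonneg (by omega) (by omega)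
  rw [if_pos (by omega : (0:Int) < n), h1]
  have h3 : (if (0:Int) < n - L then ((n - L - 0 + L - 1) / L).toNat else 0) = ((n - 1) / L).toNat := by
    split_ifs with h
    · have : n - L - 0 + L - 1 = n - 1 := by ring
      rw [this]
    · have : (n - 1) / L = 0 := Int.ediv_eq_zero_of_lt (by omega) (by omega)
      omega
  rw [h3]
  have h2 : ((n - 1) / L + 1).toNat = ((n - 1) / L).toNat + 1 := by omega
  rw [h2, List.range_succ_eq_map]
  simp only [List.map_cons, List.map_map]
  congr 1
  · simp
  · apply List.map_congr_left
    intro k _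
    simp only [Function.comp, Nat.succ_eq_add_one]
    push_cast
    ring

-- A's inner loop over a zipped block is a map of the match-indicator character.
lemma matchline_eq_map (l : List (Char × Char)) (acc : List Char) :
    l.foldl (fun m p =>
      if p.1 = p.2 ∧ p.1 ≠ '-' then m ++ ['|']
      else if p.1 ≠ '-' ∧ p.2 ≠ '-' then m ++ [':']
      else m ++ [' ']) acc = acc ++ l.map (fun (p : Char × Char) => if p.1 = p.2 ∧ p.1 ≠ '-' then '|' else if p.1 ≠ '-' ∧ p.2 ≠ '-' then ':' else ' ') := by
  induction l generalizing acc with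
  | nil => simp
  | cons x xs ih =>
    simp only [List.foldl_cons, List.map_cons, ih]
    split_ifs <;> simp

-- A's match rule and B's match rule agree pointwise.
lemma matchfn_eq (a b : Char) :
    (if a = b ∧ a ≠ '-' then '|' else if a ≠ '-' ∧ b ≠ '-' then ':' else ' ') = pvMatchChar a b := by
  unfold pvMatchChar
  by_cases h1 : a = b
  · subst h1
    by_cases h2 : a = '-' <;> simp [h2]
  · by_cases h2 : a = '-' <;> by_cases h3 : b = '-' <;> simp_all

-- B's per-block string (including the blank separator line's two newlines); proof-side only.
def pvBlk (q s : List Char) (pos : Int) : List Char :=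
  "Query  ".toList ++ pvPad6 (pos+1) ++ [' '] ++ q ++ [' '] ++ PySem.Int.toChars (pos + (q.length : Int)) ++ ['\n'] ++
  "              ".toList ++ ((q.zip s).map (fun p => pvMatchChar p.1 p.2)) ++ ['\n'] ++
  "Sbjct  ".toList ++ pvPad6 (pos+1) ++ [' '] ++ s ++ [' '] ++ PySem.Int.toChars (pos + (s.length : Int)) ++ ['\n', '\n']

-- joining A's flat 4-line blocks with '\n' equals the concatenation of B's whole blocks minus the final newline.
lemma join_flatMap4 (f g h : Int → List Char) (xs : List Int) :
    PySem.Chars.join ['\n'] (xs.flatMap (fun i => [f i, g i, h i, ([] : List Char)])) =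
    (xs.map (fun i => f i ++ ['\n'] ++ g i ++ ['\n'] ++ h i ++ ['\n', '\n'])).flatten.dropLast := by
  induction xs with
  | nil => rfl
  | cons x xs ih =>
    cases xs with
    | nil =>
      simp only [List.flatMap_cons, List.flatMap_nil, List.append_nil, List.map_cons,
        List.map_nil, List.flatten_cons, List.flatten_nil]
      rw [PySem.Chars.join_cons_cons, PySem.Chars.join_cons_cons, PySem.Chars.join_cons_cons,
          PySem.Chars.join_singleton]
      have he : f x ++ ['\n'] ++ g x ++ ['\n'] ++ h x ++ ['\n', '\n'] =
          (f x ++ ['\n'] ++ g x ++ ['\n'] ++ h x ++ ['\n']) ++ ['\n'] := by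
        simp [List.append_assoc]
      rw [he, List.dropLast_concat]
      simp [List.append_assoc]
    | cons y ys =>
      simp only [List.flatMap_cons, List.map_cons, List.cons_append, List.nil_append,
        List.flatten_cons] at ih ⊢
      rw [PySem.Chars.join_cons_cons, PySem.Chars.join_cons_cons, PySem.Chars.join_cons_cons,
          PySem.Chars.join_cons_cons, ih]
      have hne : ((f y ++ ['\n'] ++ g y ++ ['\n'] ++ h y ++ ['\n', '\n']) ++
          (List.map (fun i => f i ++ ['\n'] ++ g i ++ ['\n'] ++ h i ++ ['\n', '\n']) ys).flatten) ≠ [] := by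
        simp
      rw [List.dropLast_append_of_ne_nil hne]
      simp [List.append_assoc]

-- B's loop accumulates exactly the concatenation of the blocks at the positive-step range of chunk starts.
lemma pvGo_eq (L : Int) (hL : 0 < L) (q s : List Char) (pos : Int) (out : List Char) :
    pvGo L.toNat q s pos out =
      out ++ ((PySem.List.pyRange 0 (q.length : Int) L).map (fun i =>
        pvBlk (PySem.List.slice q (some i) (some (i + L))) (PySem.List.slice s (some i) (some (i + L))) (pos + i))).flatten := by
  have hL0 : L.toNat ≠ 0 := by omega
  induction hn : q.length using Nat.strong_induction_on generalizing q s pos out with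
  | _ n ih =>
  subst hn
  rw [pvGo]
  rw [if_neg hL0]
  by_cases hq : q = []
  · subst hq
    rw [dif_pos rfl]
    rw [pyRange_pos_nil _ _ hL (by simp)]
    simp
  · rw [dif_neg hq]
    have hlen : 0 < q.length := List.length_pos_iff.mpr hq
    have hcast : ((L.toNat : Int)) = L := by omega
    rw [hcast]
    have hhead : pvBlk (PySem.List.slice q (some 0) (some (0 + L))) (PySem.List.slice s (some 0) (some (0 + L))) (pos + 0) =
        pvBlk (q.take L.toNat) (s.take L.toNat) pos := by
      rw [PySem.List.slice_toNat _ (le_refl 0) (by omega), PySem.List.slice_toNat _ (le_refl 0) (by omega)]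
      simp
    have htail : ∀ i ∈ PySem.List.pyRange 0 ((q.length : Int) - L) L,
        ((fun i => pvBlk (PySem.List.slice q (some i) (some (i + L))) (PySem.List.slice s (some i) (some (i + L))) (pos + i)) ∘ (· + L)) i =
        pvBlk (PySem.List.slice (q.drop L.toNat) (some i) (some (i + L))) (PySem.List.slice (s.drop L.toNat) (some i) (some (i + L))) (pos + L + i) := by
      intro i hi
      have h0i : 0 ≤ i := ((PySem.List.mem_pyRange_iff_of_pos hL i).mp hi).1
      have hsl : ∀ l : List Char, PySem.List.slice l (some (i + L)) (some (i + L + L)) =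
          PySem.List.slice (l.drop L.toNat) (some i) (some (i + L)) := by
        intro l
        rw [PySem.List.slice_toNat _ (by omega) (by omega), PySem.List.slice_toNat _ (by omega) (by omega)]
        rw [List.drop_drop]
        congr 1
        · omega
        · congr 1
          omega
      simp only [Function.comp_apply]
      rw [hsl, hsl, show pos + (i + L) = pos + L + i from by ring]
    have hrest : PySem.List.pyRange 0 (((q.drop L.toNat).length : Int)) L =
        PySem.List.pyRange 0 ((q.length : Int) - L) L := by
      by_cases hle : L ≤ (q.length : Int)
      · congr 1
        simp only [List.length_drop]
        omega
      · rw [pyRange_pos_nil _ _ hL (by simp only [List.length_drop]; omega),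
            pyRange_pos_nil _ _ hL (by omega)]
    rw [pyRange_pos_cons ((q.length : Int)) L hL (by exact_mod_cast hlen)]
    simp only [List.map_cons, List.map_map, List.flatten_cons]
    rw [hhead, List.map_congr_left htail]
    rw [ih (q.drop L.toNat).length (by simp only [List.length_drop]; omega) (q.drop L.toNat) (s.drop L.toNat) (pos + L) _ rfl]
    rw [hrest]
    simp [pvBlk, List.append_assoc]

-- ===== VERDICT (by name: the statement is the Claim_ definition above) =====
theorem format_alignment_display_spec : Claim_equal_format_alignment_display := by
  intro s1s s2s L _hDom hPre
  unfold Spec_format_alignment_display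
  simp only [format_alignment_display, format_alignment_display_alt]
  rcases lt_or_gt_of_ne hPre with hneg | hpos
  · rw [if_pos (by omega), pyRange_neg_empty _ _ (by positivity) hneg]
    rfl
  · rw [if_neg (by omega)]
    rw [PySem.List.foldl_append_eq_flatMap, List.nil_append]
    simp only [matchline_eq_map, List.nil_append]
    rw [join_flatMap4]
    rw [PySem.List.slice_to_neg_one]
    rw [pvGo_eq _ hpos, List.nil_append]
    refine congrArg _ (congrArg _ (congrArg _ ?_))
    apply List.map_congr_left
    intro i _
    have hm : (fun (p : Char × Char) => if p.1 = p.2 ∧ p.1 ≠ '-' then '|' else if p.1 ≠ '-' ∧ p.2 ≠ '-' then ':' else ' ') = fun p => pvMatchChar p.1 p.2 :=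
      funext fun p => matchfn_eq p.1 p.2
    rw [hm]
    simp [pvBlk, List.append_assoc]
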